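-- pv_equiv track=rewrite | github.com/SX-Aurora/nlcpy | nlcpy/testing/helper.py | shaped_rearrange_for_broadcast
-- ===== SOURCE A (Python) =====
-- def shaped_rearrange_for_broadcast(shapes):
--     n = len(shapes)
--     ret = []
--     for i in range(n):
--         for j in range(2 ** (len(shapes[i]) * 2)):
--             _shape = []
--             _s1 = []
--             _s2 = []
--             for k in range(len(shapes[i])):
--                 _s1.append(1 if (j & 2**k) != 0 else shapes[i][k])
--                 _s2.append(
--                     1 if (j & 2**(k + len(shapes[i]))) != 0 else shapes[i][k])
--             _shape.append([_s1, _s2])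
--             ret.append(_shape[0])
--     return ret
-- ===== SOURCE B (Python) =====
-- def shaped_rearrange_for_broadcast(shapes):
--     ret = []
--     for shape in shapes:
--         L = len(shape)
--         variants = [[1 if (m >> k) & 1 else shape[k] for k in range(L)]
--                     for m in range(2 ** L)]
--         for s2 in range(2 ** L):
--             for s1 in range(2 ** L):
--                 ret.append([list(variants[s1]), list(variants[s2])])
--     return ret
-- ===== Notes on version B (the rewrite author's own statement) =====
-- stated objective: idiomatic
-- what changed: A's single packed bit-counter j over range(4**L), whose low L bits drive s1 and high L bits drive s2 inside one element-building loop, is replaced by a precomputed table of the 2**L masked variants of the shape and an explicit double loop over two independent mask indices (s1 inner, s2 outer).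
import Mathlib
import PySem

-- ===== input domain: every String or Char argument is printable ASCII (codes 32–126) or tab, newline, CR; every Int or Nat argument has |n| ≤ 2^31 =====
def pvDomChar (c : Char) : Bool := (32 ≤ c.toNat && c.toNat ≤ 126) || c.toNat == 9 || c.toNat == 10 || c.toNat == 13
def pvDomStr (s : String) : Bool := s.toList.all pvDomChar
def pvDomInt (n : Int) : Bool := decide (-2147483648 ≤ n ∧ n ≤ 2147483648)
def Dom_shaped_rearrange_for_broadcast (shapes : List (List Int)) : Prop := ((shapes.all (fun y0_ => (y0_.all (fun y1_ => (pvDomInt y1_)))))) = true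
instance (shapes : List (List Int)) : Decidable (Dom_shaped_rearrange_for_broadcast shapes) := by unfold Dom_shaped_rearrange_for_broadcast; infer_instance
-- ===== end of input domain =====

-- B replaces A's single packed bit-counter j (low bits → s1, high bits → s2) by an explicit
-- double loop over two independent mask indices into a precomputed variants table (idiomatic).

-- ===== PORT A =====
def shaped_rearrange_for_broadcast (shapes : List (List Int)) : List (List (List Int)) :=
  let n : Int := shapes.length
  (PySem.List.pyRange 0 n 1).foldl (fun ret i =>
    let shape := PySem.List.pyGetD shapes i []
    (PySem.List.pyRange 0 ((2 : Int) ^ (shape.length * 2)) 1).foldl (fun ret j =>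
      let p := (PySem.List.pyRange 0 (shape.length : Int) 1).foldl
        (fun (p : List Int × List Int) k =>
          (p.1 ++ [if PySem.Int.band j ((2 : Int) ^ k.toNat) ≠ 0 then 1
                   else PySem.List.pyGetD shape k 0],
           p.2 ++ [if PySem.Int.band j ((2 : Int) ^ (k.toNat + shape.length)) ≠ 0 then 1
                   else PySem.List.pyGetD shape k 0]))
        ([], [])
      let _shape := [[p.1, p.2]]
      ret ++ [PySem.List.pyGetD _shape 0 []]) ret) []

-- ===== PORT B =====
def shaped_rearrange_for_broadcast_alt (shapes : List (List Int)) : List (List (List Int)) :=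
  shapes.foldl (fun ret shape =>
    let L := shape.length
    let variants := (List.range (2 ^ L)).map (fun m =>
      (List.range L).map (fun k => if (m >>> k) &&& 1 ≠ 0 then (1 : Int) else shape.getD k 0))
    (List.range (2 ^ L)).foldl (fun ret s2 =>
      (List.range (2 ^ L)).foldl (fun ret s1 =>
        ret ++ [[variants.getD s1 [], variants.getD s2 []]]) ret) ret) []

-- ===== PRECONDITION & SPEC =====
def Spec_shaped_rearrange_for_broadcast (shapes : List (List Int)) (out : List (List (List Int))) : Prop := out = shaped_rearrange_for_broadcast_alt shapes
instance (shapes : List (List Int)) (out : List (List (List Int))) : Decidable (Spec_shaped_rearrange_for_broadcast shapes out) := by unfold Spec_shaped_rearrange_for_broadcast; infer_instance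

-- ===== CLAIM (what is proved, stated in full; the proofs are below) =====
def Claim_equal_shaped_rearrange_for_broadcast : Prop := ∀ (shapes : List (List Int)), Dom_shaped_rearrange_for_broadcast shapes → Spec_shaped_rearrange_for_broadcast shapes (shaped_rearrange_for_broadcast shapes)

-- ===== LEMMAS AND PROOFS =====

-- A's per-shape step (the body of A's loop over i, with shapes[i] abstracted out)
def pvStepA (ret : List (List (List Int))) (shape : List Int) : List (List (List Int)) :=
  (PySem.List.pyRange 0 ((2 : Int) ^ (shape.length * 2)) 1).foldl (fun ret j =>
    let p := (PySem.List.pyRange 0 (shape.length : Int) 1).foldl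
      (fun (p : List Int × List Int) k =>
        (p.1 ++ [if PySem.Int.band j ((2 : Int) ^ k.toNat) ≠ 0 then 1
                 else PySem.List.pyGetD shape k 0],
         p.2 ++ [if PySem.Int.band j ((2 : Int) ^ (k.toNat + shape.length)) ≠ 0 then 1
                 else PySem.List.pyGetD shape k 0]))
      ([], [])
    let _shape := [[p.1, p.2]]
    ret ++ [PySem.List.pyGetD _shape 0 []]) ret

-- B's per-shape step
def pvStepB (ret : List (List (List Int))) (shape : List Int) : List (List (List Int)) :=
  let L := shape.length
  let variants := (List.range (2 ^ L)).map (fun m =>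
    (List.range L).map (fun k => if (m >>> k) &&& 1 ≠ 0 then (1 : Int) else shape.getD k 0))
  (List.range (2 ^ L)).foldl (fun ret s2 =>
    (List.range (2 ^ L)).foldl (fun ret s1 =>
      ret ++ [[variants.getD s1 [], variants.getD s2 []]]) ret) ret

lemma pvA_eq_foldl (shapes : List (List Int)) :
    shaped_rearrange_for_broadcast shapes = shapes.foldl pvStepA [] := by
  show (PySem.List.pyRange 0 (shapes.length : Int) 1).foldl
      (fun ret i => pvStepA ret (PySem.List.pyGetD shapes i [])) [] = _
  exact PySem.List.foldl_pyRange_zero_pyGetD' shapes [] pvStepA []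

lemma pvB_eq_foldl (shapes : List (List Int)) :
    shaped_rearrange_for_broadcast_alt shapes = shapes.foldl pvStepB [] := rfl

-- range over a product splits into the double loop (outer index counts blocks of m)
lemma pv_range_mul_flatMap {α : Type} (n m : Nat) (f : Nat → α) :
    (List.range (n * m)).map f
      = (List.range n).flatMap (fun i => (List.range m).map (fun j => f (i * m + j))) := by
  induction n with
  | zero => simp
  | succ n ih =>
    rw [Nat.succ_mul, List.range_add, List.map_append, List.map_map, List.range_succ,
      List.flatMap_append, ih]
    simp [Function.comp_def]

-- the low-bit test of the packed counter j = s2*2^L + s1 reads s1, the high-bit test reads s2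
lemma pv_bit_low {L s1 s2 k : Nat} (hs1 : s1 < 2 ^ L) (hk : k < L) :
    (s2 * 2 ^ L + s1).testBit k = s1.testBit k := by
  rw [Nat.mul_comm, Nat.testBit_two_pow_mul_add _ hs1]
  simp [hk]

lemma pv_bit_high {L s1 s2 k : Nat} (hs1 : s1 < 2 ^ L) :
    (s2 * 2 ^ L + s1).testBit (k + L) = s2.testBit k := by
  rw [Nat.mul_comm, Nat.testBit_two_pow_mul_add _ hs1]
  simp

-- A's int bit test equals the Nat testBit
lemma pv_band_pow (j k : Nat) :
    (PySem.Int.band (j : Int) ((2 : Int) ^ k) ≠ 0) ↔ j.testBit k = true := by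
  have h2 : ((2 : Int) ^ k) = ((2 ^ k : Nat) : Int) := by push_cast; ring
  rw [h2, PySem.Int.band_natCast, Nat.and_two_pow]
  rcases Bool.eq_false_or_eq_true (j.testBit k) with h | h <;> simp [h]

-- B's shift-and test equals the Nat testBit
lemma pv_shift_test (m k : Nat) : ((m >>> k) &&& 1 ≠ 0) ↔ m.testBit k = true := by
  rw [Nat.and_one_is_mod, Nat.shiftRight_eq_div_pow, Nat.testBit_eq_decide_div_mod_eq]
  simp only [decide_eq_true_eq]
  omega

-- the inner pair-building loop of A splits into two independent list builds
lemma pv_getD0 {α : Type} (x d : α) : PySem.List.pyGetD [x] 0 d = x := rfl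

lemma pv_pair (shape : List Int) (j : Int) :
    (PySem.List.pyRange 0 (shape.length : Int) 1).foldl
      (fun (p : List Int × List Int) k =>
        (p.1 ++ [if PySem.Int.band j ((2 : Int) ^ k.toNat) ≠ 0 then 1
                 else PySem.List.pyGetD shape k 0],
         p.2 ++ [if PySem.Int.band j ((2 : Int) ^ (k.toNat + shape.length)) ≠ 0 then 1
                 else PySem.List.pyGetD shape k 0]))
      ([], [])
    = ((PySem.List.pyRange 0 (shape.length : Int) 1).map
         (fun k => if PySem.Int.band j ((2 : Int) ^ k.toNat) ≠ 0 then 1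
                   else PySem.List.pyGetD shape k 0),
       (PySem.List.pyRange 0 (shape.length : Int) 1).map
         (fun k => if PySem.Int.band j ((2 : Int) ^ (k.toNat + shape.length)) ≠ 0 then 1
                   else PySem.List.pyGetD shape k 0)) := by
  rw [PySem.List.foldl_prod_mk
        (fun a k => a ++ [if PySem.Int.band j ((2 : Int) ^ k.toNat) ≠ 0 then 1
                          else PySem.List.pyGetD shape k 0])
        (fun a k => a ++ [if PySem.Int.band j ((2 : Int) ^ (k.toNat + shape.length)) ≠ 0 then 1
                          else PySem.List.pyGetD shape k 0]),
      PySem.List.foldl_append_singleton_eq_map, PySem.List.foldl_append_singleton_eq_map,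
      List.nil_append, List.nil_append]

-- the per-shape blocks agree, for any accumulator
lemma pv_step_eq (acc : List (List (List Int))) (shape : List Int) :
    pvStepA acc shape = pvStepB acc shape := by
  unfold pvStepA pvStepB
  simp only [pv_pair, pv_getD0, PySem.List.foldl_append_singleton_eq_map,
    PySem.List.foldl_append_eq_flatMap]
  have hcast : ((2 : Int) ^ (shape.length * 2)) = ((2 ^ (shape.length * 2) : Nat) : Int) := by
    push_cast; ring
  rw [hcast]
  simp only [PySem.List.pyRange_zero_natCast, List.map_map]
  congr 1
  have hLL : (2 : Nat) ^ (shape.length * 2) = 2 ^ shape.length * 2 ^ shape.length := by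
    rw [Nat.mul_two, pow_add]
  rw [hLL, pv_range_mul_flatMap]
  apply List.flatMap_congr
  intro s2 hs2
  rw [List.mem_range] at hs2
  apply List.map_congr_left
  intro s1 hs1
  rw [List.mem_range] at hs1
  rw [PySem.List.getD_map_range _ _ _ _ hs1, PySem.List.getD_map_range _ _ _ _ hs2]
  simp only [Function.comp_def, PySem.List.pyGetD_natCast, Int.toNat_natCast]
  congr 1
  · apply List.map_congr_left
    intro k hk
    rw [List.mem_range] at hk
    have hc : (PySem.Int.band ((s2 * 2 ^ shape.length + s1 : Nat) : Int) ((2 : Int) ^ k) ≠ 0)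
        ↔ ((s1 >>> k) &&& 1 ≠ 0) := by
      rw [pv_band_pow, pv_bit_low hs1 hk, ← pv_shift_test]
    exact if_congr hc rfl rfl
  · congr 1
    apply List.map_congr_left
    intro k hk
    rw [List.mem_range] at hk
    have hc : (PySem.Int.band ((s2 * 2 ^ shape.length + s1 : Nat) : Int)
          ((2 : Int) ^ (k + shape.length)) ≠ 0)
        ↔ ((s2 >>> k) &&& 1 ≠ 0) := by
      rw [pv_band_pow, pv_bit_high hs1, ← pv_shift_test]
    exact if_congr hc rfl rfl

-- ===== VERDICT (by name: the statement is the Claim_ definition above) =====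
theorem shaped_rearrange_for_broadcast_spec : Claim_equal_shaped_rearrange_for_broadcast := by
  intro shapes _
  show shaped_rearrange_for_broadcast shapes = shaped_rearrange_for_broadcast_alt shapes
  rw [pvA_eq_foldl, pvB_eq_foldl]
  have : pvStepA = pvStepB := funext fun acc => funext fun shape => pv_step_eq acc shape
  rw [this]
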